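-- pv_equiv track=rewrite | github.com/yz4004/codeforce-python | daily/problem_list/2026/0216.py | solve
-- ===== SOURCE A (Python) =====
-- from math import inf, isqrt, gcd
--
-- def solve(n):
--     # 构造1-n排列 前缀和不含完全平方数
--     # 1 4 9 16 25 36 49...
--
--     # 3 5 7 9 11 13
--
--     # n^2, (n+1)^2 -- gap = 2n + 1
--
--     # 整体是平方和 则没办法摆脱
--
--     # 按1234顺序排 如果发现完全平方 交换 x,x+1 则肯定能规避 sum(1-x)=t^2 因为加了1后必然不是完全平方 至少差3
--
--     # 1...x x+1
--
--     # 1... x+1 x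
--
--     # 如果交换后到x 也是完全平方?
--
--     # sum(1..x) = (1+x)*x//2 = n^2
--     # 根据连续完全平方的规律 下一个至少是 (n+1)^2 = n^2 + 2n+1
--     # 即 x+1 至少是 2n+1 （2nk+k^2 更大了)
--     # x=2n 带回 （1+x)*x//2 = (1+2n)*n >> n^2 不对
--     # 所以 1--x+1必然不是平方数
--
--     # https://chatgpt.com/c/6992e9e4-ace0-832a-ae15-a0e510cc1ccd
--
--     s = (n+1) * n // 2
--     if s == isqrt(s) ** 2:
--         return "-1"
--
--     res = [0]*n
--     s = 0
--     for i in range(1, n+1):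
--         s += i
--         if res[i-1]: continue # 填过了
--
--         if s == isqrt(s) ** 2:
--             res[i-1], res[i] = i+1, i
--         else:
--             res[i-1] = i
--     return " ".join(map(str, res))
-- ===== SOURCE B (Python) =====
-- from math import isqrt
--
-- def _is_sq(x):
--     return isqrt(x) ** 2 == x
--
-- def _tri(i):
--     return i * (i + 1) // 2
--
-- def solve(n):
--     # stateless closed form: position j (0-based) holds j+2 if a swap lands from the
--     # right (prefix sum T(j+1) is a square and the swap partner j+2 exists), j if a
--     # swap lands from the left (T(j) is a square, j >= 1), else the identity j+1.
--     if _is_sq(_tri(n)):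
--         return "-1"
--     def val(j):
--         if j + 2 <= n and _is_sq(_tri(j + 1)):
--             return j + 2
--         if j >= 1 and _is_sq(_tri(j)):
--             return j
--         return j + 1
--     return " ".join(str(val(j)) for j in range(n))
-- ===== Notes on version B (the rewrite author's own statement) =====
-- stated objective: alternative
-- what changed: A fills a zero-initialized array in one stateful pass whose swap writes one cell ahead and a sentinel test skips the next iteration; B instead computes every output position independently from a stateless closed form over the two neighbouring triangular prefix sums, with no array mutation and no loop-carried state.
import Mathlib
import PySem

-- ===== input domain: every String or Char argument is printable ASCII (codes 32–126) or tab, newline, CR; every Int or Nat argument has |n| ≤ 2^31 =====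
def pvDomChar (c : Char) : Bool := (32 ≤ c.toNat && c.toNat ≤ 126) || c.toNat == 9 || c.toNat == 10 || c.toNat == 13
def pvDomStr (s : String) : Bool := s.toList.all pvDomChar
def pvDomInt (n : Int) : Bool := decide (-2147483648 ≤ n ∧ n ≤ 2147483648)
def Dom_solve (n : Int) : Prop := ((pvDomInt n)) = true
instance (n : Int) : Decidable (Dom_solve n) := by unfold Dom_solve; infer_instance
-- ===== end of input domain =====

-- B replaces A's stateful fill-and-skip loop by a stateless per-position closed form; objective: alternative (same cost).
-- math.isqrt is ported by hand as Nat.sqrt on .toNat — exact here since every argument it receives is nonnegative.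

-- ===== PORT A =====
-- loop body of A's for-loop (res, s) ↦ state after iteration i
def pvStepA (st : List Int × Int) (i : Int) : List Int × Int :=
  let res := st.1
  let s := st.2 + i
  if PySem.List.pyGetD res (i-1) 0 ≠ 0 then (res, s)       -- `if res[i-1]: continue`
  else if s == ((Nat.sqrt s.toNat : Int)) ^ 2 then          -- `s == isqrt(s) ** 2`
    (PySem.List.pySetD (PySem.List.pySetD res (i-1) (i+1)) i i, s)
  else (PySem.List.pySetD res (i-1) i, s)

def solve (n : Int) : String :=
  if PySem.Int.floordiv ((n+1)*n) 2 ==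
      ((Nat.sqrt (PySem.Int.floordiv ((n+1)*n) 2).toNat : Int)) ^ 2 then "-1"
  else
    PySem.Str.join " "
      ((((PySem.List.pyRange 1 (n+1) 1).foldl pvStepA
          (List.replicate n.toNat (0:Int), 0)).1).map PySem.Int.toStr)

-- ===== PORT B =====
def pvIsSq (x : Int) : Bool := ((Nat.sqrt x.toNat : Int)) ^ 2 == x   -- `isqrt(x) ** 2 == x`
def pvTri (i : Int) : Int := PySem.Int.floordiv (i*(i+1)) 2          -- `i*(i+1)//2`
def pvVal (n j : Int) : Int :=
  if j + 2 ≤ n ∧ pvIsSq (pvTri (j+1)) then j + 2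
  else if 1 ≤ j ∧ pvIsSq (pvTri j) then j
  else j + 1

def solve_alt (n : Int) : String :=
  if pvIsSq (pvTri n) then "-1"
  else PySem.Str.join " " ((PySem.List.pyRange 0 n 1).map (fun j => PySem.Int.toStr (pvVal n j)))

-- ===== PRECONDITION & SPEC =====
def Spec_solve (n : Int) (out : String) : Prop := out = solve_alt n
instance (n : Int) (out : String) : Decidable (Spec_solve n out) := by unfold Spec_solve; infer_instance

-- ===== CLAIM (what is proved, stated in full; the proofs are below) =====
def Claim_equal_solve : Prop := ∀ (n : Int), Dom_solve n → Spec_solve n (solve n)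

-- ===== LEMMAS AND PROOFS =====

-- Nat-level triangular numbers and the square test
def triN (k : Nat) : Nat := k*(k+1)/2
def sqB (k : Nat) : Bool := Nat.sqrt (triN k) ^ 2 == triN k
-- tail of A's array after k iterations: position k is pre-filled iff a swap just happened at i = k
def pvTail (m k : Nat) : List Int :=
  if 1 ≤ k ∧ sqB k = true ∧ k < m then (k:Int) :: List.replicate (m - k - 1) 0
  else List.replicate (m - k) 0

lemma two_triN (k : Nat) : 2 * triN k = k * (k+1) := by
  unfold triN
  exact Nat.mul_div_cancel' (even_iff_two_dvd.mp (Nat.even_mul_succ_self k))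

lemma triN_succ (k : Nat) : triN (k+1) = triN k + (k+1) := by
  have h1 := two_triN k
  have h2 := two_triN (k+1)
  nlinarith [h1, h2]

-- no two adjacent prefix sums (from index 1 on) are both perfect squares
lemma sqB_succ_false (k : Nat) (hk : 1 ≤ k) (h : sqB k = true) : sqB (k+1) = false := by
  by_contra hb
  rw [Bool.not_eq_false] at hb
  unfold sqB at h hb
  rw [beq_iff_eq] at h hb
  set a := Nat.sqrt (triN k) with ha0
  set b := Nat.sqrt (triN (k+1)) with hb0
  have htri : triN (k+1) = triN k + (k+1) := triN_succ k
  have h2a : 2 * a^2 = k * (k+1) := by rw [h]; exact two_triN k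
  have ha1 : 1 ≤ a := by nlinarith
  have hab : a < b := by
    by_contra hle
    push_neg at hle
    have : b^2 ≤ a^2 := Nat.pow_le_pow_left hle 2
    omega
  have hk2a : k ≥ 2*a := by nlinarith
  nlinarith

lemma pvTri_natCast (k : Nat) : pvTri (k : Int) = ((triN k : Nat) : Int) := by
  unfold pvTri triN
  have : ((k:Int))*((k:Int)+1) = ((k*(k+1) : Nat) : Int) := by push_cast; ring
  rw [this]
  exact_mod_cast PySem.Int.floordiv_natCast (k*(k+1)) 2

lemma pvIsSq_natCast (t : Nat) : pvIsSq (t : Int) = (Nat.sqrt t ^ 2 == t) := by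
  unfold pvIsSq
  simp [beq_iff_eq]
  constructor <;> intro h <;> exact_mod_cast h

lemma pvIsSq_triN (k : Nat) : pvIsSq (pvTri (k : Int)) = sqB k := by
  rw [pvTri_natCast, pvIsSq_natCast]; rfl

-- A's guard equals B's guard
lemma guardA_eq (n : Int) :
    (PySem.Int.floordiv ((n+1)*n) 2 ==
      ((Nat.sqrt (PySem.Int.floordiv ((n+1)*n) 2).toNat : Int)) ^ 2) = pvIsSq (pvTri n) := by
  have : (n+1)*n = n*(n+1) := by ring
  rw [this]
  unfold pvIsSq pvTri
  simp [beq_iff_eq, eq_comm]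

-- list surgery helpers
lemma getD_append_len {α : Type} [Inhabited α] (xs ys : List α) (d : α) :
    (xs ++ ys).getD xs.length d = ys.getD 0 d := by
  cases ys with
  | nil => simp [List.getD]
  | cons y ys => simp [List.getD]

lemma getD_append_of_len {α : Type} [Inhabited α] (xs ys : List α) (k : Nat) (d : α)
    (h : xs.length = k) : (xs ++ ys).getD k d = ys.getD 0 d := by
  subst h; exact getD_append_len xs ys d

lemma set_append_len {α : Type} (xs ys : List α) (j : Nat) (v : α) :
    (xs ++ ys).set (xs.length + j) v = xs ++ ys.set j v := by
  induction xs with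
  | nil => simp
  | cons x xs ih => simp [List.set, Nat.succ_add, ih]

lemma set_append_zero {α : Type} (xs ys : List α) (k : Nat) (v : α) (h : xs.length = k) :
    (xs ++ ys).set k v = xs ++ ys.set 0 v := by
  subst h; simpa using set_append_len xs ys 0 v

lemma set_append_one {α : Type} (xs ys : List α) (k : Nat) (v : α) (h : xs.length = k) :
    (xs ++ ys).set (k+1) v = xs ++ ys.set 1 v := by
  subst h; simpa using set_append_len xs ys 1 v

-- the three shapes one iteration of A's loop can take
lemma pvStepA_skip (res : List Int) (s i : Int) (h : PySem.List.pyGetD res (i-1) 0 ≠ 0) :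
    pvStepA (res, s) i = (res, s + i) := by
  unfold pvStepA; simp [h]

lemma pvStepA_swap (res : List Int) (s i : Int) (h0 : PySem.List.pyGetD res (i-1) 0 = 0)
    (h1 : (s + i == ((Nat.sqrt (s+i).toNat : Int)) ^ 2) = true) :
    pvStepA (res, s) i = (PySem.List.pySetD (PySem.List.pySetD res (i-1) (i+1)) i i, s + i) := by
  unfold pvStepA; simp [h0, h1]

lemma pvStepA_plain (res : List Int) (s i : Int) (h0 : PySem.List.pyGetD res (i-1) 0 = 0)
    (h1 : (s + i == ((Nat.sqrt (s+i).toNat : Int)) ^ 2) = false) :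
    pvStepA (res, s) i = (PySem.List.pySetD res (i-1) i, s + i) := by
  unfold pvStepA; simp [h0, h1]

lemma testA_natCast (t : Nat) :
    (((t : Nat) : Int) == ((Nat.sqrt (((t:Nat):Int)).toNat : Int)) ^ 2) = (Nat.sqrt t ^ 2 == t) := by
  simp only [Int.toNat_natCast]
  cases h : (Nat.sqrt t ^ 2 == t) with
  | true =>
      rw [beq_iff_eq] at h ⊢
      exact_mod_cast h.symm
  | false =>
      rw [beq_eq_false_iff_ne] at h ⊢
      intro hc; exact h (by exact_mod_cast hc.symm)

-- the loop invariant: after the first k iterations A's state is the closed-form prefix plus pvTail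
lemma foldA_inv (m : Nat) (hmsq : sqB m = false) :
    ∀ k, k ≤ m →
    (PySem.List.pyRange 1 ((k:Int)+1) 1).foldl pvStepA (List.replicate m (0:Int), 0)
      = ((List.range k).map (fun j : Nat => pvVal (m:Int) (j:Int)) ++ pvTail m k, ((triN k : Nat) : Int)) := by
  intro k
  induction k with
  | zero =>
      intro _
      rw [show ((0:Nat):Int)+1 = 1 by norm_num, PySem.List.pyRange_one_eq_nil (le_refl 1)]
      simp [pvTail, triN]
  | succ k ih =>
      intro hk1
      have hk : k < m := by omega
      have hcast : ((k+1:Nat):Int) + 1 = ((k:Int)+1)+1 := by push_cast; ring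
      rw [hcast, PySem.List.pyRange_one_succ_right (by omega), List.foldl_append, ih (by omega)]
      simp only [List.foldl_cons, List.foldl_nil]
      set P := (List.range k).map (fun j : Nat => pvVal (m:Int) (j:Int)) with hP
      have hlen : P.length = k := by simp [hP]
      have hi1 : ((k:Int)+1) - 1 = ((k:Nat):Int) := by ring
      have hsum : ((triN k : Nat):Int) + ((k:Int)+1) = ((triN (k+1) : Nat):Int) := by
        rw [triN_succ]; push_cast; ring
      have hcast1 : ((k:Int)+1) = ((k+1:Nat):Int) := by push_cast; ring
      have htest : ((((triN k : Nat):Int) + ((k:Int)+1)) ==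
          ((Nat.sqrt (((triN k : Nat):Int) + ((k:Int)+1)).toNat : Int)) ^ 2) = sqB (k+1) := by
        rw [hsum, testA_natCast]; rfl
      by_cases htc : 1 ≤ k ∧ sqB k = true ∧ k < m
      · -- a swap happened at i = k : A skips this iteration (`continue`)
        have htail : pvTail m k = ((k:Nat):Int) :: List.replicate (m - k - 1) 0 := by
          unfold pvTail; rw [if_pos htc]
        have hget : PySem.List.pyGetD (P ++ pvTail m k) (((k:Int)+1)-1) 0 = ((k:Nat):Int) := by
          rw [hi1, PySem.List.pyGetD_natCast, getD_append_of_len _ _ _ _ hlen, htail]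
          simp
        rw [pvStepA_skip _ _ _ (by rw [hget]; exact_mod_cast Nat.one_le_iff_ne_zero.mp htc.1)]
        have hs1 : sqB (k+1) = false := sqB_succ_false k htc.1 htc.2.1
        have hvk : pvVal (m:Int) ((k:Nat):Int) = ((k:Nat):Int) := by
          unfold pvVal
          have e1 : pvIsSq (pvTri (((k:Nat):Int)+1)) = false := by
            rw [hcast1, pvIsSq_triN]; exact hs1
          have e2 : pvIsSq (pvTri ((k:Nat):Int)) = true := by rw [pvIsSq_triN]; exact htc.2.1
          rw [if_neg (by simp [e1]), if_pos ⟨by exact_mod_cast htc.1, e2⟩]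
        have htail' : pvTail m (k+1) = List.replicate (m - k - 1) 0 := by
          unfold pvTail; rw [if_neg (by simp [hs1])]
          congr 1 <;> omega
        rw [htail, htail', hsum, List.range_succ, List.map_append]
        simp [hvk, List.append_assoc, ← hP]
      · -- position k is still 0 : A fills it (with or without a swap)
        have hrep : m - k = (m - k - 1) + 1 := by omega
        have htail : pvTail m k = (0:Int) :: List.replicate (m - k - 1) 0 := by
          unfold pvTail; rw [if_neg htc]
          conv_lhs => rw [hrep, List.replicate_succ]
        have hget : PySem.List.pyGetD (P ++ pvTail m k) (((k:Int)+1)-1) 0 = 0 := by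
          rw [hi1, PySem.List.pyGetD_natCast, getD_append_of_len _ _ _ _ hlen, htail]
          simp
        have hnotsq : ¬ (1 ≤ k ∧ sqB k = true) := fun h => htc ⟨h.1, h.2, hk⟩
        by_cases hs : sqB (k+1) = true
        · -- prefix sum T (k+1) is a square : swap k+1 and k+2 into place
          have hklt2 : k + 1 < m := by
            by_contra hge
            have he : k + 1 = m := by omega
            have hf : sqB (k+1) = false := by rw [he]; exact hmsq
            rw [hs] at hf; cases hf
          rw [pvStepA_swap _ _ _ hget (by rw [htest]; exact hs)]
          rw [hsum, hi1, hcast1, PySem.List.pySetD_natCast, PySem.List.pySetD_natCast]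
          have hrep2 : m - k - 1 = (m - k - 2) + 1 := by omega
          rw [htail, hrep2, List.replicate_succ]
          rw [set_append_zero P _ k _ hlen, List.set_cons_zero,
            set_append_one P _ k _ hlen, List.set_cons_succ, List.set_cons_zero]
          have hvk : pvVal (m:Int) ((k:Nat):Int) = ((k:Nat):Int) + 2 := by
            unfold pvVal
            have e1 : pvIsSq (pvTri (((k:Nat):Int)+1)) = true := by
              rw [hcast1, pvIsSq_triN]; exact hs
            rw [if_pos ⟨by exact_mod_cast (by omega : k + 2 ≤ m), e1⟩]
          have htail' : pvTail m (k+1) = ((k+1:Nat):Int) :: List.replicate (m - k - 2) 0 := by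
            unfold pvTail; rw [if_pos ⟨by omega, hs, hklt2⟩]
            congr 2 <;> omega
          rw [htail', List.range_succ, List.map_append]
          simp only [List.map_cons, List.map_nil, hvk, List.append_assoc, List.cons_append,
            List.nil_append, Prod.mk.injEq]
          refine ⟨?_, by trivial⟩
          congr 2 <;> (push_cast; ring)
        · -- not a square : fill the identity value k+1
          rw [pvStepA_plain _ _ _ hget (by rw [htest]; simpa using hs)]
          rw [hsum, hi1, PySem.List.pySetD_natCast, htail]
          rw [set_append_zero P _ k _ hlen, List.set_cons_zero]
          have hvk : pvVal (m:Int) ((k:Nat):Int) = ((k:Nat):Int) + 1 := by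
            unfold pvVal
            have e1 : pvIsSq (pvTri (((k:Nat):Int)+1)) = false := by
              rw [hcast1, pvIsSq_triN]; simpa using hs
            rw [if_neg (by simp [e1]), if_neg (by
              intro h
              exact hnotsq ⟨by exact_mod_cast h.1, by rw [← pvIsSq_triN]; exact h.2⟩)]
          have htail' : pvTail m (k+1) = List.replicate (m - k - 1) 0 := by
            unfold pvTail; rw [if_neg (by simp [hs])]
            congr 1 <;> omega
          rw [htail', List.range_succ, List.map_append]
          simp [hvk, List.append_assoc, ← hP]

lemma listA_eq_listB (m : Nat) (hmsq : sqB m = false) :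
    ((PySem.List.pyRange 1 ((m:Int)+1) 1).foldl pvStepA (List.replicate m (0:Int), 0)).1
      = (PySem.List.pyRange 0 (m:Int) 1).map (fun j => pvVal (m:Int) j) := by
  rw [foldA_inv m hmsq m (Nat.le_refl m)]
  have ht : pvTail m m = [] := by unfold pvTail; simp
  rw [ht, PySem.List.pyRange_zero_natCast, List.map_map]
  simp [Function.comp_def, ← List.map_eq_flatMap, List.map_map]

-- ===== VERDICT (by name: the statement is the Claim_ definition above) =====
theorem solve_spec : Claim_equal_solve := by
  intro n _
  unfold Spec_solve solve solve_alt
  rw [guardA_eq n]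
  by_cases hg : pvIsSq (pvTri n) = true
  · simp [hg]
  · rw [Bool.not_eq_true] at hg
    simp only [hg, Bool.false_eq_true, if_false]
    by_cases hn : 0 < n
    · have hm : n = ((n.toNat : Nat) : Int) := by omega
      rw [hm] at hg ⊢
      have hmsq : sqB n.toNat = false := by rw [← pvIsSq_triN]; exact hg
      rw [show ((n.toNat : Int)).toNat = n.toNat from by omega]
      rw [listA_eq_listB n.toNat hmsq]
      rw [List.map_map]
      simp [Function.comp_def, ← List.map_eq_flatMap, List.map_map]
    · push_neg at hn
      have h1 : PySem.List.pyRange 1 (n+1) 1 = [] := PySem.List.pyRange_one_eq_nil (by omega)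
      have h2 : PySem.List.pyRange 0 n 1 = [] := PySem.List.pyRange_one_eq_nil (by omega)
      have h3 : n.toNat = 0 := by omega
      rw [h1, h2, h3]
      simp
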